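-- pv_equiv track=rewrite | github.com/ever-just/minnesotadirectory | neon-mcp-server/fix_mann_lake_only.py | classify_page_type
-- ===== SOURCE A (Python) =====
-- def classify_page_type(url):
--     """Classify page type from URL"""
--     url_lower = url.lower()
--
--     if any(x in url_lower for x in ['/career', '/job', '/hiring', '/employment']):
--         return 'careers'
--     elif any(x in url_lower for x in ['/service', '/solution']):
--         return 'services'
--     elif any(x in url_lower for x in ['/product', '/shop', '/catalog', '/varroa', '/beekeeping', '/poultry']):
--         return 'products'
--     elif any(x in url_lower for x in ['/about', '/company', '/who-we-are']):
--         return 'about'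
--     elif any(x in url_lower for x in ['/news', '/blog', '/press', '/article']):
--         return 'news'
--     elif any(x in url_lower for x in ['/team', '/leadership', '/staff']):
--         return 'team'
--     elif any(x in url_lower for x in ['/contact', '/reach-us']):
--         return 'contact'
--     else:
--         return 'other'
-- ===== SOURCE B (Python) =====
-- # Single left-to-right scan over the URL: anchor on each slash and test which keywords
-- # start at that position, keeping the minimum-priority match seen anywhere.
-- _KEYWORD_PRIORITY = {
--     '/career': 0, '/job': 0, '/hiring': 0, '/employment': 0,
--     '/service': 1, '/solution': 1,
--     '/product': 2, '/shop': 2, '/catalog': 2, '/varroa': 2, '/beekeeping': 2, '/poultry': 2,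
--     '/about': 3, '/company': 3, '/who-we-are': 3,
--     '/news': 4, '/blog': 4, '/press': 4, '/article': 4,
--     '/team': 5, '/leadership': 5, '/staff': 5,
--     '/contact': 6, '/reach-us': 6,
-- }
-- _LABELS = ['careers', 'services', 'products', 'about', 'news', 'team', 'contact', 'other']
--
-- def classify_page_type(url):
--     """Classify page type from URL (positional scan, min-priority match)"""
--     u = url.lower()
--     best = 7
--     for i in range(len(u)):
--         if u[i] == '/':
--             for kw, p in _KEYWORD_PRIORITY.items():
--                 if p < best and u.startswith(kw, i):
--                     best = p
--     return _LABELS[best]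
-- ===== Notes on version B (the rewrite author's own statement) =====
-- stated objective: alternative
-- what changed: Instead of A's priority ladder of whole-string substring tests, B makes one left-to-right scan over the URL's positions, anchors on slash characters, tests which keywords start at each anchor, and accumulates the minimum priority matched, indexing a label array at the end.
import Mathlib
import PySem

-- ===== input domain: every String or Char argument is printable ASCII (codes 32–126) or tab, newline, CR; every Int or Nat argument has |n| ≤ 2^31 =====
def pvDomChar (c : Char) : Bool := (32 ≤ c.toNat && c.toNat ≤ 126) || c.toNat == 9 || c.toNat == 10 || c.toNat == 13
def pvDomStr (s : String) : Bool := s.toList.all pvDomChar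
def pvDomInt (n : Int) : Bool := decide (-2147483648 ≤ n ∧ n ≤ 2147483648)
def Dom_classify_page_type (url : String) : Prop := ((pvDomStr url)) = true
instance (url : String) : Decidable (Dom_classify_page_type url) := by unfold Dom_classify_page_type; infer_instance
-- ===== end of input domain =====

-- B replaces A's priority ladder of substring tests with one positional scan of the URL
-- (slash-anchored keyword matching, accumulating the minimum-priority hit); return values agree.

-- ===== PORT A =====
def classify_page_type (url : String) : String :=
  let url_lower := PySem.Str.lower url
  if ["/career", "/job", "/hiring", "/employment"].any (fun x => PySem.Str.isIn x url_lower) then "careers"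
  else if ["/service", "/solution"].any (fun x => PySem.Str.isIn x url_lower) then "services"
  else if ["/product", "/shop", "/catalog", "/varroa", "/beekeeping", "/poultry"].any (fun x => PySem.Str.isIn x url_lower) then "products"
  else if ["/about", "/company", "/who-we-are"].any (fun x => PySem.Str.isIn x url_lower) then "about"
  else if ["/news", "/blog", "/press", "/article"].any (fun x => PySem.Str.isIn x url_lower) then "news"
  else if ["/team", "/leadership", "/staff"].any (fun x => PySem.Str.isIn x url_lower) then "team"
  else if ["/contact", "/reach-us"].any (fun x => PySem.Str.isIn x url_lower) then "contact"
  else "other"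

-- ===== PORT B =====
-- _KEYWORD_PRIORITY: dict keyword -> priority, as an association list (keywords as char lists)
def kwPriorityB : List (List Char × Nat) :=
  [("/career".toList, 0), ("/job".toList, 0), ("/hiring".toList, 0), ("/employment".toList, 0),
   ("/service".toList, 1), ("/solution".toList, 1),
   ("/product".toList, 2), ("/shop".toList, 2), ("/catalog".toList, 2), ("/varroa".toList, 2),
   ("/beekeeping".toList, 2), ("/poultry".toList, 2),
   ("/about".toList, 3), ("/company".toList, 3), ("/who-we-are".toList, 3),
   ("/news".toList, 4), ("/blog".toList, 4), ("/press".toList, 4), ("/article".toList, 4),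
   ("/team".toList, 5), ("/leadership".toList, 5), ("/staff".toList, 5),
   ("/contact".toList, 6), ("/reach-us".toList, 6)]

def labelsB : List String :=
  ["careers", "services", "products", "about", "news", "team", "contact", "other"]

-- the inner `for kw, p in _KEYWORD_PRIORITY.items()` loop at one anchor position
-- (suf = u[i:], so u.startswith(kw, i) is Chars.startswith suf kw)
def innerB (suf : List Char) (best : Nat) : Nat :=
  kwPriorityB.foldl (fun b kp => if kp.2 < b ∧ PySem.Chars.startswith suf kp.1 then kp.2 else b) best

-- the outer `for i in range(len(u))` loop, as structural recursion on the suffix at i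
def scanB : List Char → Nat → Nat
  | [], best => best
  | c :: rest, best => scanB rest (if c = '/' then innerB (c :: rest) best else best)

def classify_page_type_alt (url : String) : String :=
  labelsB.getD (scanB (PySem.Str.lower url).toList 7) "other"

-- ===== PRECONDITION & SPEC =====
def Spec_classify_page_type (url : String) (out : String) : Prop := out = classify_page_type_alt url
instance (url : String) (out : String) : Decidable (Spec_classify_page_type url out) := by unfold Spec_classify_page_type; infer_instance

-- ===== CLAIM =====
def Claim_equal_classify_page_type : Prop := ∀ (url : String), Dom_classify_page_type url → Spec_classify_page_type url (classify_page_type url)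

-- ===== LEMMAS AND PROOFS =====

theorem innerB_le (suf : List Char) : ∀ (T : List (List Char × Nat)) (b : Nat),
    T.foldl (fun b kp => if kp.2 < b ∧ PySem.Chars.startswith suf kp.1 then kp.2 else b) b ≤ b := by
  intro T
  induction T with
  | nil => intro b; simp
  | cons hd tl ih =>
      intro b
      simp only [List.foldl_cons]
      split_ifs with h
      · exact le_trans (ih hd.2) (le_of_lt h.1)
      · exact ih b

theorem innerB_le_mem (suf : List Char) : ∀ (T : List (List Char × Nat)) (b : Nat)
    (kw : List Char) (p : Nat), (kw, p) ∈ T → PySem.Chars.startswith suf kw = true →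
    T.foldl (fun b kp => if kp.2 < b ∧ PySem.Chars.startswith suf kp.1 then kp.2 else b) b ≤ p := by
  intro T
  induction T with
  | nil => intro b kw p h; simp at h
  | cons hd tl ih =>
      intro b kw p hmem hsw
      rcases List.mem_cons.mp hmem with h | h
      · subst h
        simp only [List.foldl_cons]
        split_ifs with h2
        · exact innerB_le suf tl p
        · have : ¬ p < b := by
            intro hlt; exact h2 ⟨hlt, hsw⟩
          exact le_trans (innerB_le suf tl b) (not_lt.mp this)
      · exact ih _ kw p h hsw

theorem innerB_cases (suf : List Char) : ∀ (T : List (List Char × Nat)) (b : Nat),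
    T.foldl (fun b kp => if kp.2 < b ∧ PySem.Chars.startswith suf kp.1 then kp.2 else b) b = b ∨
    ∃ kp ∈ T, PySem.Chars.startswith suf kp.1 = true ∧
      T.foldl (fun b kp => if kp.2 < b ∧ PySem.Chars.startswith suf kp.1 then kp.2 else b) b = kp.2 := by
  intro T
  induction T with
  | nil => intro b; left; rfl
  | cons hd tl ih =>
      intro b
      simp only [List.foldl_cons]
      split_ifs with h
      · right
        rcases ih hd.2 with h2 | ⟨kp, hmem, hsw, hval⟩
        · exact ⟨hd, List.mem_cons_self, h.2, h2⟩
        · exact ⟨kp, List.mem_cons_of_mem _ hmem, hsw, hval⟩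
      · rcases ih b with h2 | ⟨kp, hmem, hsw, hval⟩
        · left; exact h2
        · right; exact ⟨kp, List.mem_cons_of_mem _ hmem, hsw, hval⟩

theorem scanB_le : ∀ (cs : List Char) (b : Nat), scanB cs b ≤ b := by
  intro cs
  induction cs with
  | nil => intro b; simp [scanB]
  | cons c rest ih =>
      intro b
      simp only [scanB]
      split_ifs with h
      · exact le_trans (ih _) (innerB_le _ _ _)
      · exact ih b

theorem kwPriorityB_head : ∀ kp ∈ kwPriorityB, kp.1.head? = some '/' := by decide

theorem scanB_le_mem : ∀ (cs : List Char) (b : Nat) (kw : List Char) (p : Nat),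
    (kw, p) ∈ kwPriorityB → kw <:+: cs → scanB cs b ≤ p := by
  intro cs
  induction cs with
  | nil =>
      intro b kw p hmem hinf
      have hk := kwPriorityB_head _ hmem
      have : kw = [] := List.eq_nil_of_infix_nil hinf
      simp [this] at hk
  | cons c rest ih =>
      intro b kw p hmem hinf
      rcases List.infix_cons_iff.mp hinf with hpre | hinf'
      · -- kw is a prefix of c :: rest, and kw starts with '/', so c = '/'
        have hk := kwPriorityB_head _ hmem
        have hsw : PySem.Chars.startswith (c :: rest) kw = true :=
          (PySem.Chars.startswith_iff _ _).mpr hpre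
        obtain ⟨t, ht⟩ := hpre
        have hc : c = '/' := by
          cases kw with
          | nil => simp at hk
          | cons k0 kt =>
              have h0 : k0 = '/' := by simpa using hk
              have h1 : k0 = c := by
                simp only [List.cons_append] at ht
                exact (List.cons.injEq _ _ _ _ ▸ ht).1
              exact h1 ▸ h0
        simp only [scanB, if_pos hc]
        exact le_trans (scanB_le rest _) (innerB_le_mem _ _ _ kw p hmem hsw)
      · simp only [scanB]
        exact ih _ kw p hmem hinf'

theorem scanB_cases : ∀ (cs : List Char) (b : Nat),
    scanB cs b = b ∨ ∃ kp ∈ kwPriorityB, kp.1 <:+: cs ∧ scanB cs b = kp.2 := by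
  intro cs
  induction cs with
  | nil => intro b; left; rfl
  | cons c rest ih =>
      intro b
      simp only [scanB]
      split_ifs with h
      · rcases ih (innerB (c :: rest) b) with h2 | ⟨kp, hmem, hinf, hval⟩
        · rw [h2]
          rcases innerB_cases (c :: rest) kwPriorityB b with h3 | ⟨kp, hmem, hsw, hval⟩
          · left; exact h3
          · right
            exact ⟨kp, hmem, ((PySem.Chars.startswith_iff _ _).mp hsw).isInfix, hval⟩
        · right; exact ⟨kp, hmem, List.infix_cons_iff.mpr (Or.inr hinf), hval⟩
      · rcases ih b with h2 | ⟨kp, hmem, hinf, hval⟩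
        · left; exact h2
        · right
          exact ⟨kp, hmem, List.infix_cons_iff.mpr (Or.inr hinf), hval⟩

theorem scan_eq_of (cs : List Char) (g : Nat) (hg7 : g ≤ 7)
    (hle : scanB cs 7 ≤ g)
    (hlow : ∀ kw p, (kw, p) ∈ kwPriorityB → p < g → ¬ kw <:+: cs) :
    scanB cs 7 = g := by
  rcases scanB_cases cs 7 with h | ⟨⟨kw, p⟩, hmem, hinf, hval⟩
  · omega
  · have hp : ¬ p < g := fun hlt => hlow kw p hmem hlt hinf
    omega

-- ===== VERDICT =====
set_option maxHeartbeats 2000000 in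
theorem classify_page_type_spec : Claim_equal_classify_page_type := by
  intro url _
  unfold Spec_classify_page_type classify_page_type classify_page_type_alt
  set u := PySem.Str.lower url with hu
  dsimp only
  split_ifs with h0 h1 h2 h3 h4 h5 h6
  · -- branch careers
    have hle : scanB u.toList 7 ≤ 0 := by
      simp only [List.any_eq_true, List.mem_cons, List.not_mem_nil, or_false] at h0
      obtain ⟨x, hx, hin⟩ := h0
      have hinf := (PySem.Str.isIn_iff_infix x u).mp hin
      rcases hx with rfl|rfl|rfl|rfl <;> exact scanB_le_mem _ _ _ _ (by decide) hinf
    have hlow : ∀ kw p, (kw, p) ∈ kwPriorityB → p < 0 → ¬ kw <:+: u.toList :=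
      fun kw p _ hlt => absurd hlt (by omega)
    rw [scan_eq_of u.toList 0 (by omega) hle hlow]
    rfl
  · -- branch services
    have hle : scanB u.toList 7 ≤ 1 := by
      simp only [List.any_eq_true, List.mem_cons, List.not_mem_nil, or_false] at h1
      obtain ⟨x, hx, hin⟩ := h1
      have hinf := (PySem.Str.isIn_iff_infix x u).mp hin
      rcases hx with rfl|rfl <;> exact scanB_le_mem _ _ _ _ (by decide) hinf
    have hlow : ∀ kw p, (kw, p) ∈ kwPriorityB → p < 1 → ¬ kw <:+: u.toList := by
      intro kw p hmem hlt hinf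
      fin_cases hmem <;>
        first
          | omega
          | (rw [← PySem.Str.isIn_iff_infix] at hinf; simp_all)
    rw [scan_eq_of u.toList 1 (by omega) hle hlow]
    rfl
  · -- branch products
    have hle : scanB u.toList 7 ≤ 2 := by
      simp only [List.any_eq_true, List.mem_cons, List.not_mem_nil, or_false] at h2
      obtain ⟨x, hx, hin⟩ := h2
      have hinf := (PySem.Str.isIn_iff_infix x u).mp hin
      rcases hx with rfl|rfl|rfl|rfl|rfl|rfl <;> exact scanB_le_mem _ _ _ _ (by decide) hinf
    have hlow : ∀ kw p, (kw, p) ∈ kwPriorityB → p < 2 → ¬ kw <:+: u.toList := by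
      intro kw p hmem hlt hinf
      fin_cases hmem <;>
        first
          | omega
          | (rw [← PySem.Str.isIn_iff_infix] at hinf; simp_all)
    rw [scan_eq_of u.toList 2 (by omega) hle hlow]
    rfl
  · -- branch about
    have hle : scanB u.toList 7 ≤ 3 := by
      simp only [List.any_eq_true, List.mem_cons, List.not_mem_nil, or_false] at h3
      obtain ⟨x, hx, hin⟩ := h3
      have hinf := (PySem.Str.isIn_iff_infix x u).mp hin
      rcases hx with rfl|rfl|rfl <;> exact scanB_le_mem _ _ _ _ (by decide) hinf
    have hlow : ∀ kw p, (kw, p) ∈ kwPriorityB → p < 3 → ¬ kw <:+: u.toList := by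
      intro kw p hmem hlt hinf
      fin_cases hmem <;>
        first
          | omega
          | (rw [← PySem.Str.isIn_iff_infix] at hinf; simp_all)
    rw [scan_eq_of u.toList 3 (by omega) hle hlow]
    rfl
  · -- branch news
    have hle : scanB u.toList 7 ≤ 4 := by
      simp only [List.any_eq_true, List.mem_cons, List.not_mem_nil, or_false] at h4
      obtain ⟨x, hx, hin⟩ := h4
      have hinf := (PySem.Str.isIn_iff_infix x u).mp hin
      rcases hx with rfl|rfl|rfl|rfl <;> exact scanB_le_mem _ _ _ _ (by decide) hinf
    have hlow : ∀ kw p, (kw, p) ∈ kwPriorityB → p < 4 → ¬ kw <:+: u.toList := by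
      intro kw p hmem hlt hinf
      fin_cases hmem <;>
        first
          | omega
          | (rw [← PySem.Str.isIn_iff_infix] at hinf; simp_all)
    rw [scan_eq_of u.toList 4 (by omega) hle hlow]
    rfl
  · -- branch team
    have hle : scanB u.toList 7 ≤ 5 := by
      simp only [List.any_eq_true, List.mem_cons, List.not_mem_nil, or_false] at h5
      obtain ⟨x, hx, hin⟩ := h5
      have hinf := (PySem.Str.isIn_iff_infix x u).mp hin
      rcases hx with rfl|rfl|rfl <;> exact scanB_le_mem _ _ _ _ (by decide) hinf
    have hlow : ∀ kw p, (kw, p) ∈ kwPriorityB → p < 5 → ¬ kw <:+: u.toList := by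
      intro kw p hmem hlt hinf
      fin_cases hmem <;>
        first
          | omega
          | (rw [← PySem.Str.isIn_iff_infix] at hinf; simp_all)
    rw [scan_eq_of u.toList 5 (by omega) hle hlow]
    rfl
  · -- branch contact
    have hle : scanB u.toList 7 ≤ 6 := by
      simp only [List.any_eq_true, List.mem_cons, List.not_mem_nil, or_false] at h6
      obtain ⟨x, hx, hin⟩ := h6
      have hinf := (PySem.Str.isIn_iff_infix x u).mp hin
      rcases hx with rfl|rfl <;> exact scanB_le_mem _ _ _ _ (by decide) hinf
    have hlow : ∀ kw p, (kw, p) ∈ kwPriorityB → p < 6 → ¬ kw <:+: u.toList := by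
      intro kw p hmem hlt hinf
      fin_cases hmem <;>
        first
          | omega
          | (rw [← PySem.Str.isIn_iff_infix] at hinf; simp_all)
    rw [scan_eq_of u.toList 6 (by omega) hle hlow]
    rfl
  · -- branch other
    have hlow : ∀ kw p, (kw, p) ∈ kwPriorityB → p < 7 → ¬ kw <:+: u.toList := by
      intro kw p hmem hlt hinf
      fin_cases hmem <;> (rw [← PySem.Str.isIn_iff_infix] at hinf; simp_all)
    rw [scan_eq_of u.toList 7 (by omega) (scanB_le _ _) hlow]
    rfl
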